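-- pv_equiv track=rewrite | github.com/us-ja/GWAS_Internship_2025 | value_change_tests/trick.py | calculate_decimal
-- ===== SOURCE A (Python) =====
-- def calculate_decimal(list):
--     "calculates decimal number treatings all - as 0"
--     d=[0]
--     m=len(list)
--     for i in range(m):
--         if list[i]==1:
--             for k in range(len(d)):
--                 d[k]=d[k]+(2**(m-i-1))
--         elif list[i]!=0:#then it's something else most probably unknown -
--             for k in range(len(d)):
--                 d.append(d[k]+(2**(m-i-1)))
--     return d
-- ===== SOURCE B (Python) =====
-- def calculate_decimal(list):
--     "calculates decimal number treatings all - as 0"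
--     m = len(list)
--     base = 0
--     unknown = []
--     for i, v in enumerate(list):
--         w = 2 ** (m - i - 1)
--         if v == 1:
--             base += w
--         elif v != 0:
--             unknown.append(w)
--     d = [base]
--     for w in unknown:
--         d = d + [x + w for x in d]
--     return d
-- ===== Notes on version B (the rewrite author's own statement) =====
-- stated objective: alternative
-- what changed: A re-walks the whole growing list d at every position (adding the bit to every element for a 1, doubling with an inner scan for an unknown); B makes one pass collecting the base sum of the 1-bits and the list of unknown-bit weights, then doubles the result list once per unknown bit; since the output itself has size 2^u, a timing run shows no measurable speed-up.
import Mathlib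
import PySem

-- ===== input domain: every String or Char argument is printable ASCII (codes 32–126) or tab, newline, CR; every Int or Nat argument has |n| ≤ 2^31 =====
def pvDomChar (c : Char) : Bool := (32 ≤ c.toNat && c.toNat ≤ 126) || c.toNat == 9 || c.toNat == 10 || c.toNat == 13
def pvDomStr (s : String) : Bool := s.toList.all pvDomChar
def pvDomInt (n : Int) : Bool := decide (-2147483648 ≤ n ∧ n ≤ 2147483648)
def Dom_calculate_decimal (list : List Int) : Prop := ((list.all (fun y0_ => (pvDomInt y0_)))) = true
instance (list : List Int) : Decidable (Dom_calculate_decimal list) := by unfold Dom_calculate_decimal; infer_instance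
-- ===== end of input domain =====

-- B collects the base sum of 1-bits and the unknown-bit weights in one pass, then doubles the
-- result list once per unknown bit (alternative: no re-scan of the growing list at every position).


-- ===== PORT A =====
def calculate_decimal (list : List Int) : List Int :=
  let m : Int := (list.length : Int)
  (PySem.List.pyRange 0 m 1).foldl (fun d i =>
    let v := PySem.List.pyGetD list i 0   -- index i ∈ range(m) is always in range
    if v = 1 then
      d.map (fun x => x + 2 ^ (m - i - 1).toNat)
    else if v ≠ 0 then
      d ++ d.map (fun x => x + 2 ^ (m - i - 1).toNat)
    else d) [0]

-- ===== PORT B =====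
def calculate_decimal_alt (list : List Int) : List Int :=
  let m : Int := (list.length : Int)
  let bu := (PySem.List.enumerate list 0).foldl
    (fun (p : Int × List Int) (iv : Int × Int) =>
      let w : Int := 2 ^ (m - iv.1 - 1).toNat
      if iv.2 = 1 then (p.1 + w, p.2)
      else if iv.2 ≠ 0 then (p.1, p.2 ++ [w])
      else p) (0, [])
  bu.2.foldl (fun d w => d ++ d.map (fun x => x + w)) [bu.1]

-- ===== PRECONDITION & SPEC =====
def Spec_calculate_decimal (list : List Int) (out : List Int) : Prop := out = calculate_decimal_alt list
instance (list : List Int) (out : List Int) : Decidable (Spec_calculate_decimal list out) := by unfold Spec_calculate_decimal; infer_instance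

-- ===== CLAIM (what is proved, stated in full; the proofs are below) =====
def Claim_equal_calculate_decimal : Prop := ∀ (list : List Int), Dom_calculate_decimal list → Spec_calculate_decimal list (calculate_decimal list)

-- ===== LEMMAS AND PROOFS =====

-- A's loop body / B's accumulator body, over (index, value) pairs with weight function wt
def pvStepA (wt : Int → Int) (d : List Int) (iv : Int × Int) : List Int :=
  if iv.2 = 1 then d.map (fun x => x + wt iv.1)
  else if iv.2 ≠ 0 then d ++ d.map (fun x => x + wt iv.1)
  else d

def pvStepB (wt : Int → Int) (p : Int × List Int) (iv : Int × Int) : Int × List Int :=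
  if iv.2 = 1 then (p.1 + wt iv.1, p.2)
  else if iv.2 ≠ 0 then (p.1, p.2 ++ [wt iv.1])
  else p

def pvDbl (d : List Int) (w : Int) : List Int := d ++ d.map (fun x => x + w)

-- B's accumulator fold splits off its starting value
theorem pvStepB_acc (wt : Int → Int) (ps : List (Int × Int)) (b0 : Int) (u0 : List Int) :
    ps.foldl (pvStepB wt) (b0, u0) =
      (b0 + (ps.foldl (pvStepB wt) (0, [])).1, u0 ++ (ps.foldl (pvStepB wt) (0, [])).2) := by
  induction ps generalizing b0 u0 with
  | nil => simp
  | cons hd tl ih =>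
    simp only [List.foldl_cons, pvStepB]
    split_ifs with h1 h2
    · rw [ih, ih (0 + wt hd.1) []]; simp [add_assoc, add_comm]
    · rw [ih, ih 0 ([] ++ [wt hd.1])]; simp
    · exact ih b0 u0

-- main invariant: A's fold = base-shift then doublings, for any pair list and start d
theorem pvMain (wt : Int → Int) (ps : List (Int × Int)) (d : List Int) :
    ps.foldl (pvStepA wt) d =
      (ps.foldl (pvStepB wt) (0, [])).2.foldl pvDbl
        (d.map (fun x => x + (ps.foldl (pvStepB wt) (0, [])).1)) := by
  induction ps generalizing d with
  | nil => simp
  | cons hd tl ih =>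
    simp only [List.foldl_cons]
    by_cases h1 : hd.2 = 1
    · simp only [pvStepA, pvStepB, h1, if_true]
      rw [ih (d.map (fun x => x + wt hd.1)), pvStepB_acc wt tl (0 + wt hd.1) []]
      simp only [List.nil_append, List.map_map]
      congr 1
      apply List.map_congr_left; intro x _; simp [Function.comp]; ring
    · by_cases h2 : hd.2 ≠ 0
      · simp only [pvStepA, pvStepB, if_neg h1, if_pos h2]
        rw [ih (d ++ d.map (fun x => x + wt hd.1))]
        simp only [List.nil_append]
        rw [pvStepB_acc wt tl 0 [wt hd.1]]
        simp only [List.singleton_append, List.foldl_cons]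
        congr 1
        simp only [pvDbl, List.map_append, List.map_map]
        congr 1
        all_goals (apply List.map_congr_left; intro x _; dsimp [Function.comp]; ring)
      · rw [ne_eq, not_not] at h2
        simp only [pvStepA, pvStepB, h2, ne_eq, not_true_eq_false, if_false]
        exact ih d

-- A's pyRange-indexed fold is the fold over enumerate
theorem pvA_enum (list : List Int) (wt : Int → Int) (d0 : List Int) :
    (PySem.List.pyRange 0 (list.length : Int) 1).foldl
        (fun d i =>
          let v := PySem.List.pyGetD list i 0
          if v = 1 then d.map (fun x => x + wt i)
          else if v ≠ 0 then d ++ d.map (fun x => x + wt i)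
          else d) d0
    = (PySem.List.enumerate list 0).foldl (pvStepA wt) d0 := by
  rw [PySem.List.enumerate_eq_map_pyRange (d := 0), List.foldl_map]
  rfl

-- ===== VERDICT (by name: the statement is the Claim_ definition above) =====
theorem calculate_decimal_spec : Claim_equal_calculate_decimal := by
  intro list _
  unfold Spec_calculate_decimal calculate_decimal calculate_decimal_alt
  set m : Int := (list.length : Int) with hm
  rw [pvA_enum list (fun i => 2 ^ (m - i - 1).toNat) [0]]
  rw [pvMain]
  simp only [List.map_cons, List.map_nil, zero_add]
  rfl
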